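-- pv_equiv track=rewrite | github.com/much-to-learn2/aoc2022 | day14/solution.py | get_points_from_line
-- ===== SOURCE A (Python) =====
-- from typing import Tuple, Iterable, List
--
-- def get_points_from_line(p1: "Point", p2: "Point") -> Iterable["Point"]:
--     x_diff, y_diff = p2[0] - p1[0], p2[1] - p1[1]
--     if x_diff and y_diff:
--         raise ValueError("Diagonal line")
--     if x_diff:
--         step = 1 if x_diff > 0 else -1
--         for i in range(p1[0], p2[0] + step, step):
--             yield (i, p1[1])
--     if y_diff:
--         step = 1 if y_diff > 0 else -1
--         for i in range(p1[1], p2[1] + step, step):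
--             yield(p1[0], i)
-- ===== SOURCE B (Python) =====
-- def get_points_from_line(p1, p2):
--     if p1[0] != p2[0] and p1[1] != p2[1]:
--         raise ValueError("Diagonal line")
--     if p1 == p2:
--         return
--     # build the canonical ascending segment, then reverse it as a second pass if
--     # the segment actually runs in the negative direction
--     if p1[1] == p2[1]:
--         pts = [(x, p1[1]) for x in range(min(p1[0], p2[0]), max(p1[0], p2[0]) + 1)]
--     else:
--         pts = [(p1[0], y) for y in range(min(p1[1], p2[1]), max(p1[1], p2[1]) + 1)]
--     if (p2[0] - p1[0]) + (p2[1] - p1[1]) < 0: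
--         pts.reverse()
--     yield from pts
-- ===== Notes on version B (the rewrite author's own statement) =====
-- stated objective: alternative
-- what changed: Instead of walking the segment with a signed step like A, B builds the canonical ascending min..max segment (no step/direction logic in the generation) and then reverses it in a separate second pass when the segment runs in the negative direction; Pre_ excludes diagonal inputs, on which A raises ValueError on first iteration.
import Mathlib
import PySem

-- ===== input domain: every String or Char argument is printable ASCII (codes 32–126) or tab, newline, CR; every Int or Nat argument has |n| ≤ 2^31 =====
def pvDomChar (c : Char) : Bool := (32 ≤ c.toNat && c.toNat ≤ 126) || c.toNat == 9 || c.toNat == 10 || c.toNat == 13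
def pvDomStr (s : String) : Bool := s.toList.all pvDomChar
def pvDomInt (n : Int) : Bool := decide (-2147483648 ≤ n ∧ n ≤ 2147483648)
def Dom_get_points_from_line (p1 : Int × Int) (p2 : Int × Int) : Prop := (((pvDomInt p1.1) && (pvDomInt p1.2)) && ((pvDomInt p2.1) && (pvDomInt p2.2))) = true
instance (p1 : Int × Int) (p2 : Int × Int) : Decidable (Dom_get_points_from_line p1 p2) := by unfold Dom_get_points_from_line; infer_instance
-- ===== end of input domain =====

-- B builds the canonical ascending min..max segment (no step/direction logic) and reverses
-- it in a separate second pass when the segment runs negatively, instead of A's signed-step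
-- walk; same cost, different decomposition. Equivalence is about the list of yielded points
-- (the Python generators are materialised).

-- ===== PORT A =====
def get_points_from_line (p1 : Int × Int) (p2 : Int × Int) : List (Int × Int) :=
  let x_diff := p2.1 - p1.1
  let y_diff := p2.2 - p1.2
  if x_diff ≠ 0 ∧ y_diff ≠ 0 then []  -- raise ValueError("Diagonal line"); excluded by Pre_
  else
    (if x_diff ≠ 0 then
      let step : Int := if x_diff > 0 then 1 else -1
      (PySem.List.pyRange p1.1 (p2.1 + step) step).map (fun i => (i, p1.2))
     else []) ++
    (if y_diff ≠ 0 then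
      let step : Int := if y_diff > 0 then 1 else -1
      (PySem.List.pyRange p1.2 (p2.2 + step) step).map (fun i => (p1.1, i))
     else [])

-- ===== PORT B =====
def get_points_from_line_alt (p1 : Int × Int) (p2 : Int × Int) : List (Int × Int) :=
  if p1.1 ≠ p2.1 ∧ p1.2 ≠ p2.2 then []  -- raise ValueError("Diagonal line"); excluded by Pre_
  else if p1 = p2 then []
  else
    let pts :=
      if p1.2 = p2.2 then
        (PySem.List.pyRange (min p1.1 p2.1) (max p1.1 p2.1 + 1) 1).map (fun x => (x, p1.2))
      else
        (PySem.List.pyRange (min p1.2 p2.2) (max p1.2 p2.2 + 1) 1).map (fun y => (p1.1, y))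
    if (p2.1 - p1.1) + (p2.2 - p1.2) < 0 then pts.reverse else pts

-- ===== PRECONDITION & SPEC =====
-- Pre_ excludes diagonal segments, on which the Python A raises ValueError.
def Pre_get_points_from_line (p1 : Int × Int) (p2 : Int × Int) : Prop :=
  p2.1 = p1.1 ∨ p2.2 = p1.2
instance (p1 : Int × Int) (p2 : Int × Int) : Decidable (Pre_get_points_from_line p1 p2) := by
  unfold Pre_get_points_from_line; infer_instance
def pvWitness_get_points_from_line : (Int × Int) × (Int × Int) := ((2, 3), (2, 7))

def Spec_get_points_from_line (p1 : Int × Int) (p2 : Int × Int) (out : List (Int × Int)) : Prop := out = get_points_from_line_alt p1 p2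
instance (p1 : Int × Int) (p2 : Int × Int) (out : List (Int × Int)) : Decidable (Spec_get_points_from_line p1 p2 out) := by unfold Spec_get_points_from_line; infer_instance

-- ===== CLAIM (what is proved, stated in full; the proofs are below) =====
def Claim_equal_get_points_from_line : Prop := ∀ (p1 : Int × Int) (p2 : Int × Int), Dom_get_points_from_line p1 p2 → Pre_get_points_from_line p1 p2 → Spec_get_points_from_line p1 p2 (get_points_from_line p1 p2)

-- ===== LEMMAS AND PROOFS =====

-- ===== VERDICT (by name: the statement is the Claim_ definition above) =====
theorem get_points_from_line_spec : Claim_equal_get_points_from_line := by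
  intro p1 p2 _ hpre
  unfold Spec_get_points_from_line get_points_from_line get_points_from_line_alt
  rcases hpre with h | h
  · -- vertical: p2.1 = p1.1
    rcases lt_trichotomy (p2.2 - p1.2) 0 with hy | hy | hy
    · -- descending
      have c6 : ¬ (p1 = p2) := by intro e; rw [e] at hy; omega
      simp only [if_neg (by omega : ¬ (p2.1 - p1.1 ≠ 0 ∧ p2.2 - p1.2 ≠ 0)),
        if_neg (by omega : ¬ (p2.1 - p1.1 ≠ 0)),
        if_pos (by omega : p2.2 - p1.2 ≠ 0),
        if_neg (by omega : ¬ (p2.2 - p1.2 > 0)),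
        if_neg (by omega : ¬ (p1.1 ≠ p2.1 ∧ p1.2 ≠ p2.2)),
        if_neg c6,
        if_neg (by omega : ¬ (p1.2 = p2.2)),
        if_pos (by omega : (p2.1 - p1.1) + (p2.2 - p1.2) < 0),
        min_eq_right (by omega : p2.2 ≤ p1.2), max_eq_left (by omega : p2.2 ≤ p1.2),
        List.nil_append]
      rw [show p2.2 + -1 = (p2.2 - 1) by ring, PySem.List.pyRange_neg_one_eq_reverse,
          show p2.2 - 1 + 1 = p2.2 by ring, List.map_reverse]
    · -- p1 = p2
      have e : p1 = p2 := Prod.ext (by omega) (by omega)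
      subst e
      simp
    · -- ascending
      have c6 : ¬ (p1 = p2) := by intro e; rw [e] at hy; omega
      simp only [if_neg (by omega : ¬ (p2.1 - p1.1 ≠ 0 ∧ p2.2 - p1.2 ≠ 0)),
        if_neg (by omega : ¬ (p2.1 - p1.1 ≠ 0)),
        if_pos (by omega : p2.2 - p1.2 ≠ 0),
        if_pos (by omega : p2.2 - p1.2 > 0),
        if_neg (by omega : ¬ (p1.1 ≠ p2.1 ∧ p1.2 ≠ p2.2)),
        if_neg c6,
        if_neg (by omega : ¬ (p1.2 = p2.2)),
        if_neg (by omega : ¬ ((p2.1 - p1.1) + (p2.2 - p1.2) < 0)),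
        min_eq_left (by omega : p1.2 ≤ p2.2), max_eq_right (by omega : p1.2 ≤ p2.2),
        List.nil_append]
  · -- horizontal: p2.2 = p1.2
    rcases lt_trichotomy (p2.1 - p1.1) 0 with hx | hx | hx
    · -- descending
      have c6 : ¬ (p1 = p2) := by intro e; rw [e] at hx; omega
      simp only [if_neg (by omega : ¬ (p2.1 - p1.1 ≠ 0 ∧ p2.2 - p1.2 ≠ 0)),
        if_pos (by omega : p2.1 - p1.1 ≠ 0),
        if_neg (by omega : ¬ (p2.2 - p1.2 ≠ 0)),
        if_neg (by omega : ¬ (p2.1 - p1.1 > 0)),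
        if_neg (by omega : ¬ (p1.1 ≠ p2.1 ∧ p1.2 ≠ p2.2)),
        if_neg c6,
        if_pos (by omega : p1.2 = p2.2),
        if_pos (by omega : (p2.1 - p1.1) + (p2.2 - p1.2) < 0),
        min_eq_right (by omega : p2.1 ≤ p1.1), max_eq_left (by omega : p2.1 ≤ p1.1),
        List.append_nil]
      rw [show p2.1 + -1 = (p2.1 - 1) by ring, PySem.List.pyRange_neg_one_eq_reverse,
          show p2.1 - 1 + 1 = p2.1 by ring, List.map_reverse]
    · -- p1 = p2
      have e : p1 = p2 := Prod.ext (by omega) (by omega)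
      subst e
      simp
    · -- ascending
      have c6 : ¬ (p1 = p2) := by intro e; rw [e] at hx; omega
      simp only [if_neg (by omega : ¬ (p2.1 - p1.1 ≠ 0 ∧ p2.2 - p1.2 ≠ 0)),
        if_pos (by omega : p2.1 - p1.1 ≠ 0),
        if_neg (by omega : ¬ (p2.2 - p1.2 ≠ 0)),
        if_pos (by omega : p2.1 - p1.1 > 0),
        if_neg (by omega : ¬ (p1.1 ≠ p2.1 ∧ p1.2 ≠ p2.2)),
        if_neg c6,
        if_pos (by omega : p1.2 = p2.2),
        if_neg (by omega : ¬ ((p2.1 - p1.1) + (p2.2 - p1.2) < 0)),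
        min_eq_left (by omega : p1.1 ≤ p2.1), max_eq_right (by omega : p1.1 ≤ p2.1),
        List.append_nil]
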